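-- pv_equiv track=rewrite | github.com/danfcaval/progfgv | Lista 01/lista_1_parte_1.py | rotate_tuple
-- ===== SOURCE A (Python) =====
-- def rotate_tuple(tpl: tuple, n: int):
--     """ Recebe uma tuple e um inteiro (n), e retorna uma tuple rotacionada n posicoes para direita """
--
--     tamanho_tpl = len(tpl) #tamanho total da tuple
--     vezes_n_maior_tpl = n // tamanho_tpl #multiplicador que sera utilizado para saber quantas vezes o inteiro vai nos fazer percorrer a tuple por completa
--     subtrator = tamanho_tpl * vezes_n_maior_tpl #subtrator para remover da posicao final as vezes totais que vamos percorrer a tuple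
--
--     resposta = [None] * tamanho_tpl #output to mesmo tamanho da tuple
--
--     for indice, valor in enumerate(tpl): #usado enumerate para ter valores da tuple e sua posicao
--         posicao_desejada = indice + n - subtrator #nova posicao calculada como posicao atual + inteiro - subtrator de vezes percorrido por completo
--
--         if posicao_desejada >= tamanho_tpl: #se nao percorreu uma vez por completo mas mesmo assim ficou como depois do fim da tuple
--             posicao_desejada = posicao_desejada - tamanho_tpl #subtrai uma vez o tamanho da tuple
--
--         resposta[posicao_desejada] = valor
--
--     return tuple(resposta)
-- ===== SOURCE B (Python) =====
-- def rotate_tuple(tpl: tuple, n: int):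
--     """Rotate a tuple n positions to the right via slicing."""
--     k = n % len(tpl)
--     return tpl[-k:] + tpl[:-k]
-- ===== Notes on version B (the rewrite author's own statement) =====
-- stated objective: idiomatic
-- what changed: Replaces the per-element index-assignment loop into a preallocated list with a single floor-modulo shift and two slices concatenated (tpl[-k:] + tpl[:-k]).
import Mathlib
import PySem

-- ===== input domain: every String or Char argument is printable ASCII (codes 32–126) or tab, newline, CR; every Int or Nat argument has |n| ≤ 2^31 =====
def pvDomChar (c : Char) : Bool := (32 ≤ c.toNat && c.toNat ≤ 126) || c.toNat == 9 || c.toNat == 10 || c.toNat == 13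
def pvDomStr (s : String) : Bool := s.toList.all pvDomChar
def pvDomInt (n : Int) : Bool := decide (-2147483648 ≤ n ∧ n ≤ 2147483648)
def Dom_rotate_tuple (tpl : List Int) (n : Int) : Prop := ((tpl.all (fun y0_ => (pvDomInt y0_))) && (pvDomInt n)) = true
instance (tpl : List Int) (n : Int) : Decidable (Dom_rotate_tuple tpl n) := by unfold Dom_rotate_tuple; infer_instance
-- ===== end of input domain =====

-- B rotates by slicing (tpl[-k:] + tpl[:-k] with k = n % len) instead of A's
-- index-assignment loop into a preallocated list; same return values everywhere A returns.

-- ===== PORT A =====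
-- Literal transliteration of A. On the admitted inputs (tpl ≠ []) the computed
-- index posicao_desejada always lies in [0, len tpl) (proved below), so
-- `.toNat` + `List.set` is exact for `resposta[posicao_desejada] = valor`; every
-- slot gets written, so the final `Option.getD 0` rendering `tuple(resposta)`
-- never sees a leftover `none`.
def rotate_tuple (tpl : List Int) (n : Int) : List Int :=
  let tamanho_tpl : Int := tpl.length
  let vezes_n_maior_tpl : Int := PySem.Int.floordiv n tamanho_tpl
  let subtrator : Int := tamanho_tpl * vezes_n_maior_tpl
  let resposta : List (Option Int) := List.replicate tpl.length none
  let resposta :=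
    (PySem.List.enumerate tpl 0).foldl
      (fun acc p =>
        let pos : Int := p.1 + n - subtrator
        let pos : Int := if pos ≥ tamanho_tpl then pos - tamanho_tpl else pos
        acc.set pos.toNat (some p.2)) resposta
  resposta.map (fun o => o.getD 0)

-- ===== PORT B =====
def rotate_tuple_alt (tpl : List Int) (n : Int) : List Int :=
  let k : Int := PySem.Int.mod n tpl.length
  PySem.List.slice tpl (some (-k)) none ++ PySem.List.slice tpl none (some (-k))

-- ===== PRECONDITION & SPEC =====
-- Pre_ excludes only the empty tuple, on which both A and B raise ZeroDivisionError (n // 0, n % 0).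
def Pre_rotate_tuple (tpl : List Int) (n : Int) : Prop := tpl ≠ []
instance (tpl : List Int) (n : Int) : Decidable (Pre_rotate_tuple tpl n) := by unfold Pre_rotate_tuple; infer_instance
def pvWitness_rotate_tuple : List Int × Int := ([1, 2, 3], 1)

def Spec_rotate_tuple (tpl : List Int) (n : Int) (out : List Int) : Prop := out = rotate_tuple_alt tpl n
instance (tpl : List Int) (n : Int) (out : List Int) : Decidable (Spec_rotate_tuple tpl n out) := by unfold Spec_rotate_tuple; infer_instance

-- ===== CLAIM (what is proved, stated in full; the proofs are below) =====
def Claim_equal_rotate_tuple : Prop := ∀ (tpl : List Int) (n : Int), Dom_rotate_tuple tpl n → Pre_rotate_tuple tpl n → Spec_rotate_tuple tpl n (rotate_tuple tpl n)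

-- ===== LEMMAS AND PROOFS =====

-- A's fold preserves the length of `resposta`
theorem pv_foldl_length (posf : Int → Nat) (ps : List (Int × Int)) (acc : List (Option Int)) :
    (ps.foldl (fun a p => a.set (posf p.1) (some p.2)) acc).length = acc.length := by
  induction ps generalizing acc with
  | nil => rfl
  | cons p ps ih => simp [List.foldl_cons, ih]

-- positions never written keep their value from acc
theorem pv_foldl_miss (posf : Int → Nat) (ps : List (Int × Int)) (acc : List (Option Int)) (j : Nat)
    (h : ∀ p ∈ ps, posf p.1 ≠ j) :
    (ps.foldl (fun a p => a.set (posf p.1) (some p.2)) acc)[j]? = acc[j]? := by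
  induction ps generalizing acc with
  | nil => rfl
  | cons p ps ih =>
      rw [List.foldl_cons, ih _ (fun q hq => h q (List.mem_cons_of_mem _ hq))]
      exact List.getElem?_set_ne (h p List.mem_cons_self)

-- if exactly one enumerated index maps to slot j, the fold leaves that element there
theorem pv_foldl_hit (posf : Int → Nat) (tpl : List Int) (s : Int) (acc : List (Option Int))
    (j i0 : Nat) (hi0 : i0 < tpl.length) (hlen : tpl.length ≤ acc.length)
    (hj : j < acc.length)
    (hhit : posf (s + i0) = j)
    (hmiss : ∀ i : Nat, i < tpl.length → i ≠ i0 → posf (s + i) ≠ j) :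
    ((PySem.List.enumerate tpl s).foldl (fun a p => a.set (posf p.1) (some p.2)) acc)[j]?
      = some (some tpl[i0]) := by
  induction tpl generalizing s acc i0 with
  | nil => exact absurd hi0 (by simp)
  | cons x xs ih =>
      rw [PySem.List.enumerate_cons, List.foldl_cons]
      have hfst : ∀ p ∈ PySem.List.enumerate xs (s + 1), s + 1 ≤ p.1 ∧ p.1 < s + 1 + xs.length := by
        intro p hp
        have h1 : p.1 ∈ (PySem.List.enumerate xs (s + 1)).map (·.1) :=
          List.mem_map_of_mem hp
        rw [PySem.List.map_fst_enumerate] at h1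
        exact (PySem.List.mem_pyRange_one).1 h1
      cases i0 with
      | zero =>
          simp only [Nat.cast_zero, add_zero] at hhit
          rw [pv_foldl_miss]
          · rw [hhit]; exact List.getElem?_set_self hj
          · intro p hp
            obtain ⟨h1, h2⟩ := hfst p hp
            have heq : p.1 = s + ((p.1 - s).toNat : Int) := by omega
            rw [heq]
            apply hmiss
            · simp at h2 ⊢; omega
            · omega
      | succ i0 =>
          have := ih (s + 1) (acc.set (posf s) (some x)) i0
            (by simpa using hi0) (by simp at hlen ⊢; omega) (by simpa using hj)
            (by rw [← hhit]; congr 1; push_cast; ring)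
            (by
              intro i hi hne
              have : s + 1 + (i : Int) = s + ((i + 1 : Nat) : Int) := by push_cast; ring
              rw [this]
              exact hmiss (i + 1) (by simpa using hi) (by omega))
          simpa using this

theorem rotate_tuple_spec : Claim_equal_rotate_tuple := by
  intro tpl n _ hne
  unfold Spec_rotate_tuple
  -- abbreviations
  set L : Nat := tpl.length with hLdef
  have hL : 0 < L := List.length_pos_iff.mpr hne
  have hLpos : (0 : Int) < (L : Int) := by exact_mod_cast hL
  set k : Int := PySem.Int.mod n (L : Int) with hkdef
  have hk0 : 0 ≤ k := PySem.Int.mod_nonneg n hLpos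
  have hk1 : k < (L : Int) := PySem.Int.mod_lt n hLpos
  set kn : Nat := k.toNat with hkn
  have hknk : (kn : Int) = k := Int.toNat_of_nonneg hk0
  have hknL : kn < L := by omega
  -- A's pos arithmetic reduces to i + k
  have harith : ∀ i : Int, i + n - (L : Int) * PySem.Int.floordiv n (L : Int) = i + k := by
    intro i
    have h := PySem.Int.floordiv_mul_add_mod n (L : Int)
    rw [hkdef]; linarith [h]
  -- the write position function of A
  set posf : Int → Nat :=
    fun i => (if i + k ≥ (L : Int) then i + k - (L : Int) else i + k).toNat with hposf
  have hA : rotate_tuple tpl n =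
      ((PySem.List.enumerate tpl 0).foldl
        (fun a p => a.set (posf p.1) (some p.2))
        (List.replicate L none)).map (fun o => o.getD 0) := by
    unfold rotate_tuple
    simp only [← hLdef]
    congr 1
    apply PySem.List.foldl_congr_mem
    intro a p _
    simp only [hposf, harith p.1]
  -- lengths
  have hAlen : (rotate_tuple tpl n).length = L := by
    rw [hA, List.length_map, pv_foldl_length posf, List.length_replicate]
  -- B in drop/take form
  have hB : rotate_tuple_alt tpl n =
      (if kn = 0 then tpl ++ ([] : List Int) else tpl.drop (L - kn) ++ tpl.take (L - kn)) := by
    unfold rotate_tuple_alt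
    simp only [← hLdef, ← hkdef]
    by_cases h0 : kn = 0
    · have hkz : k = 0 := by omega
      simp [h0, hkz, PySem.List.slice_from, PySem.List.slice_to]
    · have hkpos : 0 < kn := Nat.pos_of_ne_zero h0
      rw [if_neg h0, ← hknk]
      have hd : PySem.List.slice tpl (some (-(kn : Int))) none = tpl.drop (L - kn) := by
        rw [PySem.List.slice_some_none, PySem.List.clampIdx_neg_natCast _ _ hkpos]
      have hc : PySem.List.clampIdx tpl.length (-(kn : Int)) = L - kn :=
        PySem.List.clampIdx_neg_natCast _ _ hkpos
      have ht : PySem.List.slice tpl none (some (-(kn : Int))) = tpl.take (L - kn) := by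
        simp [PySem.List.slice, hc]
      rw [hd, ht]
  have hBlen : (rotate_tuple_alt tpl n).length = L := by
    rw [hB]; split_ifs with h0 <;> simp <;> omega
  -- elementwise
  apply List.ext_getElem?
  intro j
  by_cases hjL : j < L
  · -- the unique source index for slot j
    set i0 : Nat := if j < kn then j + L - kn else j - kn with hi0def
    have hi0L : i0 < L := by rw [hi0def]; split_ifs <;> omega
    have hhit : posf ((0 : Int) + (i0 : Int)) = j := by
      rw [hposf]
      simp only [zero_add]
      rw [hi0def]
      by_cases hjk : j < kn
      · rw [if_pos hjk]; split_ifs <;> push_cast at * <;> omega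
      · rw [if_neg hjk]; split_ifs <;> push_cast at * <;> omega
    have hmiss : ∀ i : Nat, i < L → i ≠ i0 → posf ((0 : Int) + (i : Int)) = j → False := by
      intro i hi hnei hcon
      rw [hposf] at hcon
      simp only [zero_add] at hcon
      rw [hi0def] at hnei
      split_ifs at hcon <;> split_ifs at hnei <;> omega
    have hi0tl : i0 < tpl.length := by omega
    have hAj : (rotate_tuple tpl n)[j]? = tpl[i0]? := by
      rw [hA, List.getElem?_map,
        pv_foldl_hit posf tpl 0 (List.replicate L none) j i0 hi0tl
          (by simp; omega) (by simpa using hjL) hhit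
          (fun i hi hne hcon => hmiss i (by omega) hne hcon),
        List.getElem?_eq_getElem hi0tl]
      rfl
    rw [hAj, hB]
    by_cases h0 : kn = 0
    · rw [if_pos h0, List.append_nil]
      have hij : i0 = j := by rw [hi0def]; split_ifs <;> omega
      rw [hij]
    · rw [if_neg h0]
      by_cases hjk : j < kn
      · have hjlt : j < (tpl.drop (L - kn)).length := by simp; omega
        rw [List.getElem?_append_left hjlt, List.getElem?_drop]
        have hij : i0 = L - kn + j := by rw [hi0def]; split_ifs <;> omega
        rw [hij]
      · have hge : (tpl.drop (L - kn)).length ≤ j := by simp; omega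
        rw [List.getElem?_append_right hge]
        have hlen2 : (tpl.drop (L - kn)).length = kn := by simp; omega
        rw [hlen2, List.getElem?_take_of_lt (by omega)]
        have hij : i0 = j - kn := by rw [hi0def]; split_ifs <;> omega
        rw [hij]
  · -- out of range on both sides
    rw [List.getElem?_eq_none (by omega), List.getElem?_eq_none (by omega)]
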